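-- pv_equiv track=rewrite | github.com/abhipsaMisra/CSCE689_Natural_language_Processing | finalProject-coreference-resolution-milti-sieve-algi/src/sieves.py | strict_head_matching
-- ===== SOURCE A (Python) =====
-- import itertools
--
-- stopwords = ['i', 'me', 'my', 'myself', 'we', 'our', 'ours', 'ourselves', 'you', 'your', 'yours',
--                  'yourself', 'yourselves', 'he', 'him', 'his', 'himself', 'she', 'her', 'hers',
--                  'herself', 'it', 'its', 'itself', 'they', 'them', 'their', 'theirs', 'themselves',
--                  'what', 'which', 'who', 'whom', 'this', 'that', 'these', 'those', 'am', 'is', 'are',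
--                  'was', 'were', 'be', 'been', 'being', 'have', 'has', 'had', 'having', 'do', 'does',
--                  'did', 'doing', 'a', 'an', 'the', 'and', 'but', 'if', 'or', 'because', 'as', 'until',
--                  'while', 'of', 'at', 'by', 'for', 'with', 'about', 'against', 'between', 'into',
--                  'through', 'during', 'before', 'after', 'above', 'below', 'to', 'from', 'up', 'down',
--                  'in', 'out', 'on', 'off', 'over', 'under', 'again', 'further', 'then', 'once', 'here',
--                  'there', 'when', 'where', 'why', 'how', 'all', 'any', 'both', 'each', 'few', 'more',
--                  'most', 'other', 'some', 'such', 'no', 'nor', 'not', 'only', 'own', 'same', 'so',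
--                  'than', 'too', 'very', 's', 't', 'can', 'will', 'just', 'don', 'should', 'now']
--
-- def strict_head_matching(noun_phrases):
--     for np_1, np_2 in itertools.combinations(noun_phrases, 2):
--         np_1_words = np_1[1].split()
--         np_2_words = np_2[1].split()
--         if (len(np_1_words) > 1 or len(np_2_words) > 1):
--             for word1 in np_1_words:
--                 if word1.lower() not in stopwords:
--                     for word2 in np_2_words:
--                         if word2.lower() not in stopwords:
--                             if (word1.lower() == word2.lower()):
--                                 if (len(np_1) == 2):
--                                     np_1.append(np_2[0])
--                                 if (len(np_2) == 2):
--                                     np_2.append(np_1[0])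
--                                 continue
--     return noun_phrases
-- ===== SOURCE B (Python) =====
-- stopwords = ['i', 'me', 'my', 'myself', 'we', 'our', 'ours', 'ourselves', 'you', 'your', 'yours',
--                  'yourself', 'yourselves', 'he', 'him', 'his', 'himself', 'she', 'her', 'hers',
--                  'herself', 'it', 'its', 'itself', 'they', 'them', 'their', 'theirs', 'themselves',
--                  'what', 'which', 'who', 'whom', 'this', 'that', 'these', 'those', 'am', 'is', 'are',
--                  'was', 'were', 'be', 'been', 'being', 'have', 'has', 'had', 'having', 'do', 'does',
--                  'did', 'doing', 'a', 'an', 'the', 'and', 'but', 'if', 'or', 'because', 'as', 'until',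
--                  'while', 'of', 'at', 'by', 'for', 'with', 'about', 'against', 'between', 'into',
--                  'through', 'during', 'before', 'after', 'above', 'below', 'to', 'from', 'up', 'down',
--                  'in', 'out', 'on', 'off', 'over', 'under', 'again', 'further', 'then', 'once', 'here',
--                  'there', 'when', 'where', 'why', 'how', 'all', 'any', 'both', 'each', 'few', 'more',
--                  'most', 'other', 'some', 'such', 'no', 'nor', 'not', 'only', 'own', 'same', 'so',
--                  'than', 'too', 'very', 's', 't', 'can', 'will', 'just', 'don', 'should', 'now']
--
-- def strict_head_matching(noun_phrases):
--     # Each length-2 phrase gets the id of its first (in pair-enumeration order)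
--     # partner sharing a non-stopword head word appended.  Mutates in place like A.
--     n = len(noun_phrases)
--     if n < 2:
--         return noun_phrases
--     stop = frozenset(stopwords)
--     infos = []
--     for np in noun_phrases:
--         words = np[1].split()
--         infos.append((len(words) > 1, {w.lower() for w in words} - stop))
--     for k, np in enumerate(noun_phrases):
--         if len(np) != 2:
--             continue
--         multi_k, keys_k = infos[k]
--         for m in range(n):
--             if m == k:
--                 continue
--             multi_m, keys_m = infos[m]
--             if (multi_k or multi_m) and not keys_k.isdisjoint(keys_m):
--                 np.append(noun_phrases[m][0])
--                 break
--     return noun_phrases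
-- ===== Notes on version B (the rewrite author's own statement) =====
-- stated objective: faster
-- what changed: B precomputes each phrase's set of lowered non-stopword words once and, for each length-2 phrase, scans partners in pair-enumeration order taking the first whose key set is non-disjoint, replacing A's per-pair nested word-by-word scans with linear stopword-list membership tests.
import Mathlib
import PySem

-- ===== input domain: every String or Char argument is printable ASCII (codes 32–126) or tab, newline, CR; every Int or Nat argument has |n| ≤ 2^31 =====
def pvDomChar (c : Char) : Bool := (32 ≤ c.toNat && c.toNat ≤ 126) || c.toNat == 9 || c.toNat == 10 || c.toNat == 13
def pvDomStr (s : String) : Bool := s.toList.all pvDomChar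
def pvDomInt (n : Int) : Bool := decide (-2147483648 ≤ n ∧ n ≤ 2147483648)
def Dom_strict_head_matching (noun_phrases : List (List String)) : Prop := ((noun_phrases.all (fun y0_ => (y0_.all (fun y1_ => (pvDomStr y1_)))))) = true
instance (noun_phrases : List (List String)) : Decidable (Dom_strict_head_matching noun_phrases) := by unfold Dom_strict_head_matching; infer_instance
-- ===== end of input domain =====

-- B replaces A's per-pair nested word-by-word scans (with linear stopword-list membership
-- tests) by per-phrase precomputed lowered non-stopword key sets and a first-match partner
-- scan per length-2 phrase.  Like A, the Python B mutates the inner lists in place; the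
-- equivalence proved here is about the returned value.

-- the module-level constant 'stopwords'
def pvStop : List String := ["i", "me", "my", "myself", "we", "our", "ours", "ourselves", "you", "your", "yours", "yourself", "yourselves", "he", "him", "his", "himself", "she", "her", "hers", "herself", "it", "its", "itself", "they", "them", "their", "theirs", "themselves", "what", "which", "who", "whom", "this", "that", "these", "those", "am", "is", "are", "was", "were", "be", "been", "being", "have", "has", "had", "having", "do", "does", "did", "doing", "a", "an", "the", "and", "but", "if", "or", "because", "as", "until", "while", "of", "at", "by", "for", "with", "about", "against", "between", "into", "through", "during", "before", "after", "above", "below", "to", "from", "up", "down", "in", "out", "on", "off", "over", "under", "again", "further", "then", "once", "here", "there", "when", "where", "why", "how", "all", "any", "both", "each", "few", "more", "most", "other", "some", "such", "no", "nor", "not", "only", "own", "same", "so", "than", "too", "very", "s", "t", "can", "will", "just", "don", "should", "now"]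

-- ===== PORT A =====
-- body of the innermost match case: 'if len(np_1)==2: np_1.append(np_2[0]); if len(np_2)==2: np_2.append(np_1[0])'
-- (np_2[0] / np_1[0] are in range under Pre_; pyGetD is exact there)
def pvApplyPair (p : List String × List String) : List String × List String :=
  let a := if p.1.length == 2 then p.1 ++ [PySem.List.pyGetD p.2 0 ""] else p.1
  let b := if p.2.length == 2 then p.2 ++ [PySem.List.pyGetD a 0 ""] else p.2
  (a, b)

-- one iteration of A's outer pair loop, for the pair of positions (i, j); the mutation of the
-- two list objects np_1 and np_2 is modelled by writing the evolved pair back at i and j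
def pvStepPair (s : List (List String)) (i j : Nat) : List (List String) :=
  let np1 := s.getD i []
  let np2 := s.getD j []
  let w1 := PySem.Str.split₀ (PySem.List.pyGetD np1 1 "")
  let w2 := PySem.Str.split₀ (PySem.List.pyGetD np2 1 "")
  if w1.length > 1 ∨ w2.length > 1 then
    let q := w1.foldl (fun (p : List String × List String) word1 =>
      if PySem.Str.lower word1 ∈ pvStop then p
      else w2.foldl (fun (p : List String × List String) word2 =>
        if PySem.Str.lower word2 ∉ pvStop ∧ PySem.Str.lower word1 = PySem.Str.lower word2 then
          pvApplyPair p
        else p) p) (np1, np2)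
    (s.set i q.1).set j q.2
  else s

-- itertools.combinations(noun_phrases, 2), as the lexicographic list of index pairs
def pvCombos (n : Nat) : List (Nat × Nat) :=
  (List.range n).flatMap (fun i => (List.range' (i + 1) (n - (i + 1))).map (fun j => (i, j)))

def strict_head_matching (noun_phrases : List (List String)) : List (List String) :=
  (pvCombos noun_phrases.length).foldl (fun s p => pvStepPair s p.1 p.2) noun_phrases

-- ===== PORT B =====
def pvStopSet : PySem.Set String := PySem.Set.ofList pvStop

-- per-phrase precomputation: (more than one word?, set of lowered non-stopword words)
def pvInfo (np : List String) : Bool × PySem.Set String :=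
  let ws := PySem.Str.split₀ (PySem.List.pyGetD np 1 "")
  (decide (ws.length > 1),
   PySem.Set.diff (PySem.Set.ofList (ws.map PySem.Str.lower)) pvStopSet)

def pvMatch (infos : List (Bool × PySem.Set String)) (k m : Nat) : Bool :=
  let ik := infos.getD k (false, PySem.Set.empty)
  let im := infos.getD m (false, PySem.Set.empty)
  (ik.1 || im.1) && !(PySem.Set.isdisjoint ik.2 im.2)

def strict_head_matching_alt (noun_phrases : List (List String)) : List (List String) :=
  let n := noun_phrases.length
  if n < 2 then noun_phrases
  else
    let infos := noun_phrases.map pvInfo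
    (List.range n).foldl (fun s k =>
      let np := s.getD k []
      if np.length == 2 then
        -- 'for m in range(n): if m == k: continue … break' = first match in partner order
        match ((List.range n).filter (fun m => m ≠ k)).find? (fun m => pvMatch infos k m) with
        | some m => s.set k (np ++ [PySem.List.pyGetD (s.getD m []) 0 ""])
        | none => s
      else s) noun_phrases

-- ===== PRECONDITION & SPEC =====
-- Pre_ excludes exactly the inputs on which A raises IndexError: with at least two noun
-- phrases, every inner list must have at least the two elements np[0], np[1] that A indexes.
def Pre_strict_head_matching (noun_phrases : List (List String)) : Prop :=
  noun_phrases.length < 2 ∨ ∀ np ∈ noun_phrases, 2 ≤ np.length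
instance (noun_phrases : List (List String)) : Decidable (Pre_strict_head_matching noun_phrases) := by unfold Pre_strict_head_matching; infer_instance

def pvWitness_strict_head_matching : List (List String) :=
  [["1", "green apple"], ["2", "apple pie"], ["3", "it"]]

def Spec_strict_head_matching (noun_phrases : List (List String)) (out : List (List String)) : Prop := out = strict_head_matching_alt noun_phrases
instance (noun_phrases : List (List String)) (out : List (List String)) : Decidable (Spec_strict_head_matching noun_phrases out) := by unfold Spec_strict_head_matching; infer_instance

-- ===== CLAIM (what is proved, stated in full; the proofs are below) =====
def Claim_equal_strict_head_matching : Prop := ∀ (noun_phrases : List (List String)), Dom_strict_head_matching noun_phrases → Pre_strict_head_matching noun_phrases → Spec_strict_head_matching noun_phrases (strict_head_matching noun_phrases)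

-- ===== LEMMAS AND PROOFS =====

-- abbreviations over the ORIGINAL input (indices into it)
def pvOrig (nps : List (List String)) (k : Nat) : List String := nps.getD k []
def pvWds (nps : List (List String)) (k : Nat) : List String :=
  PySem.Str.split₀ (PySem.List.pyGetD (pvOrig nps k) 1 "")
def pvKeys (nps : List (List String)) (k : Nat) : List String :=
  ((pvWds nps k).map PySem.Str.lower).filter (fun x => x ∉ pvStop)
def pvHd (nps : List (List String)) (m : Nat) : String := PySem.List.pyGetD (pvOrig nps m) 0 ""

-- the (symmetric) head-match relation between positions k and m
def pvM (nps : List (List String)) (k m : Nat) : Bool :=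
  (decide ((pvWds nps k).length > 1) || decide ((pvWds nps m).length > 1))
    && (pvKeys nps k).any (fun x => decide (x ∈ pvKeys nps m))

-- final value of entry k
def pvFin (nps : List (List String)) (k : Nat) : List String :=
  if (pvOrig nps k).length = 2 then
    match ((List.range nps.length).filter (fun m => m ≠ k)).find? (fun m => pvM nps k m) with
    | some m => pvOrig nps k ++ [pvHd nps m]
    | none => pvOrig nps k
  else pvOrig nps k

-- partners of k contributed by a pair list, in order
def pvPartnersOf (k : Nat) (P : List (Nat × Nat)) : List Nat :=
  P.filterMap (fun p => if p.1 = k then some p.2 else if p.2 = k then some p.1 else none)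

-- extension of entry k after processing the pairs P
def pvExt (nps : List (List String)) (k : Nat) (P : List (Nat × Nat)) : List String :=
  if (pvOrig nps k).length = 2 then
    match (pvPartnersOf k P).find? (fun m => pvM nps k m) with
    | some m => [pvHd nps m]
    | none => []
  else []


theorem pvFind?_congr {α : Type} (l : List α) (p q : α → Bool) (h : ∀ x ∈ l, p x = q x) :
    l.find? p = l.find? q := by
  induction l with
  | nil => rfl
  | cons x t ih =>
    simp only [List.find?_cons]
    rw [h x (by simp)]
    cases q x
    · exact ih (fun y hy => h y (by simp [hy]))
    · rfl

theorem pvAppendGetD (xs e : List String) (i : Nat) (h : i < xs.length) :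
    (xs ++ e).getD i "" = xs.getD i "" := by
  rw [List.getD_eq_getElem _ _ (by simp; omega), List.getD_eq_getElem _ _ h,
    List.getElem_append_left h]

theorem pvMapRangeGetD {α : Type} (n j : Nat) (f : Nat → α) (d : α) (h : j < n) :
    ((List.range n).map f).getD j d = f j := by
  rw [List.getD_eq_getElem _ _ (by simp [h])]
  simp

theorem pvSetMapRange {α : Type} (n j : Nat) (f : Nat → α) (v : α) (h : j < n) :
    ((List.range n).map f).set j v = (List.range n).map (fun m => if m = j then v else f m) := by
  apply List.ext_getElem
  · simp
  · intro i h1 h2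
    simp only [List.getElem_set, List.getElem_map, List.getElem_range]
    simp only [List.length_set, List.length_map, List.length_range] at h1
    by_cases hij : j = i
    · simp [hij]
    · simp only [if_neg hij, if_neg (fun h' : i = j => hij h'.symm)]

theorem pvMapOrig (nps : List (List String)) :
    (List.range nps.length).map (fun k => pvOrig nps k) = nps := by
  apply List.ext_getElem
  · simp
  · intro i h1 h2
    simp only [List.getElem_map, List.getElem_range]
    unfold pvOrig
    rw [List.getD_eq_getElem _ _ (by simpa using h1)]

theorem pvOrig_mem (nps : List (List String)) (k : Nat) (hk : k < nps.length) :
    pvOrig nps k ∈ nps := by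
  unfold pvOrig
  rw [List.getD_eq_getElem _ _ hk]
  exact List.getElem_mem hk

theorem pvMem_keys (nps : List (List String)) (k : Nat) (x : String) :
    x ∈ pvKeys nps k ↔ (x ∈ (pvWds nps k).map PySem.Str.lower ∧ x ∉ pvStop) := by
  unfold pvKeys
  simp

theorem pvMatch_eq (nps : List (List String)) (k m : Nat) (hk : k < nps.length)
    (hm : m < nps.length) : pvMatch (nps.map pvInfo) k m = pvM nps k m := by
  unfold pvMatch
  have hg : ∀ a, a < nps.length →
      (nps.map pvInfo).getD a (false, PySem.Set.empty) = pvInfo (pvOrig nps a) := by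
    intro a ha
    rw [List.getD_eq_getElem _ _ (by simpa using ha), List.getElem_map]
    unfold pvOrig
    rw [List.getD_eq_getElem _ _ ha]
  rw [hg k hk, hg m hm]
  unfold pvInfo pvM
  simp only []
  congr 1
  rw [Bool.eq_iff_iff]
  simp only [Bool.not_eq_eq_eq_not, Bool.not_true, ← Bool.not_eq_true,
    PySem.Set.isdisjoint_iff]
  push Not
  constructor
  · rintro ⟨x, hx1, hx2⟩
    rw [PySem.Set.mem_diff, PySem.Set.mem_ofList] at hx1 hx2
    refine List.any_eq_true.2 ⟨x, ?_, by
      simp only [decide_eq_true_eq, pvMem_keys]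
      exact ⟨hx2.1, by simpa [pvStopSet, PySem.Set.mem_ofList] using hx2.2⟩⟩
    rw [pvMem_keys]
    exact ⟨hx1.1, by simpa [pvStopSet, PySem.Set.mem_ofList] using hx1.2⟩
  · intro h
    obtain ⟨x, hx1, hx2⟩ := List.any_eq_true.1 h
    simp only [decide_eq_true_eq] at hx2
    rw [pvMem_keys] at hx1 hx2
    refine ⟨x, ?_, ?_⟩ <;> rw [PySem.Set.mem_diff, PySem.Set.mem_ofList] <;>
      constructor
    · exact hx1.1
    · simpa [pvStopSet, PySem.Set.mem_ofList] using hx1.2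
    · exact hx2.1
    · simpa [pvStopSet, PySem.Set.mem_ofList] using hx2.2

theorem pvFoldlIdem {α β : Type} (l : List β) (f : α → β → α) (p : β → Bool) (g : α → α)
    (I : α → Prop) (hf : ∀ a x, I a → f a x = if p x then g a else a)
    (hI : ∀ a, I a → I (g a)) (hgg : ∀ a, I a → g (g a) = g a)
    (a : α) (ha : I a) : l.foldl f a = if l.any p then g a else a := by
  induction l generalizing a with
  | nil => simp
  | cons x t ih =>
    simp only [List.foldl_cons, List.any_cons]
    rw [hf a x ha]
    by_cases hx : p x = true
    · simp only [hx, if_true, Bool.true_or]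
      rw [ih (g a) (hI a ha)]
      by_cases ht : t.any p = true
      · simp [ht, hgg a ha]
      · simp [ht]
    · simp only [Bool.not_eq_true] at hx
      simp only [hx, Bool.false_or]
      exact ih a ha

theorem pvM_symm (nps : List (List String)) (k m : Nat) : pvM nps k m = pvM nps m k := by
  unfold pvM
  rw [Bool.or_comm]
  congr 1
  rw [Bool.eq_iff_iff]
  simp only [List.any_eq_true, decide_eq_true_eq]
  constructor
  · rintro ⟨x, hx, hx2⟩; exact ⟨x, hx2, hx⟩
  · rintro ⟨x, hx, hx2⟩; exact ⟨x, hx2, hx⟩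


-- A-side abbreviation: the guarded append 'if len(np)==2: np.append(v)'
def pvA2 (x : List String) (v : String) : List String := if x.length == 2 then x ++ [v] else x

theorem pvA2_ne {x : List String} (h : x ≠ []) (v : String) : pvA2 x v ≠ [] := by
  unfold pvA2; split
  · simp
  · exact h

theorem pvA2_getD0 {x : List String} (h : x ≠ []) (v : String) :
    (pvA2 x v).getD 0 "" = x.getD 0 "" := by
  unfold pvA2; split
  · exact pvAppendGetD _ _ 0 (List.length_pos_of_ne_nil h)
  · rfl

theorem pvA2_idem (x : List String) (v w : String) : pvA2 (pvA2 x v) w = pvA2 x v := by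
  unfold pvA2
  by_cases h : (x.length == 2) = true
  · rw [if_pos h, if_neg (by simp at h ⊢; omega)]
  · simp [h]

theorem pvApplyPair_eq (p : List String × List String) (h1 : p.1 ≠ []) :
    pvApplyPair p = (pvA2 p.1 (p.2.getD 0 ""), pvA2 p.2 (p.1.getD 0 "")) := by
  unfold pvApplyPair pvA2
  simp only [PySem.List.pyGetD_ofNat']
  by_cases hc : (p.1.length == 2) = true
  · rw [if_pos hc, pvAppendGetD _ _ 0 (List.length_pos_of_ne_nil h1)]
  · rw [if_neg hc]

theorem pvPairI (p : List String × List String) (hp : p.1 ≠ [] ∧ p.2 ≠ []) :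
    (pvApplyPair p).1 ≠ [] ∧ (pvApplyPair p).2 ≠ [] := by
  rw [pvApplyPair_eq p hp.1]
  exact ⟨pvA2_ne hp.1 _, pvA2_ne hp.2 _⟩

theorem pvPairIdem (p : List String × List String) (hp : p.1 ≠ [] ∧ p.2 ≠ []) :
    pvApplyPair (pvApplyPair p) = pvApplyPair p := by
  rw [pvApplyPair_eq p hp.1]
  rw [pvApplyPair_eq _ (by simp; exact pvA2_ne hp.1 _)]
  simp only []
  rw [pvA2_getD0 hp.2, pvA2_getD0 hp.1, pvA2_idem, pvA2_idem]

theorem pvWordFold (w1 w2 : List String) (a b : List String) (ha : a ≠ []) (hb : b ≠ []) :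
    w1.foldl (fun (p : List String × List String) word1 =>
      if PySem.Str.lower word1 ∈ pvStop then p
      else w2.foldl (fun (p : List String × List String) word2 =>
        if PySem.Str.lower word2 ∉ pvStop ∧ PySem.Str.lower word1 = PySem.Str.lower word2 then
          pvApplyPair p
        else p) p) (a, b)
    = if w1.any (fun x => !(decide (PySem.Str.lower x ∈ pvStop)) && w2.any (fun y =>
          !(decide (PySem.Str.lower y ∈ pvStop)) && (PySem.Str.lower x == PySem.Str.lower y)))
      then (pvA2 a (b.getD 0 ""), pvA2 b (a.getD 0 "")) else (a, b) := by
  have hf : ∀ (p : List String × List String) (x : String), (p.1 ≠ [] ∧ p.2 ≠ []) →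
      (if PySem.Str.lower x ∈ pvStop then p
       else w2.foldl (fun (p : List String × List String) word2 =>
        if PySem.Str.lower word2 ∉ pvStop ∧ PySem.Str.lower x = PySem.Str.lower word2 then
          pvApplyPair p
        else p) p)
      = if (!(decide (PySem.Str.lower x ∈ pvStop)) && w2.any (fun y =>
          !(decide (PySem.Str.lower y ∈ pvStop)) && (PySem.Str.lower x == PySem.Str.lower y)))
        then pvApplyPair p else p := by
    intro p x hp
    by_cases hs : PySem.Str.lower x ∈ pvStop
    · simp [hs]
    · rw [if_neg hs]
      have hf2 : ∀ (q : List String × List String) (y : String), (q.1 ≠ [] ∧ q.2 ≠ []) →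
          (if PySem.Str.lower y ∉ pvStop ∧ PySem.Str.lower x = PySem.Str.lower y then
            pvApplyPair q
          else q)
          = if (!(decide (PySem.Str.lower y ∈ pvStop)) && (PySem.Str.lower x == PySem.Str.lower y))
            then pvApplyPair q else q := by
        intro q y _
        by_cases hc : PySem.Str.lower y ∉ pvStop ∧ PySem.Str.lower x = PySem.Str.lower y
        · rw [if_pos hc, if_pos (by simp [hc.1, hc.2])]
        · rw [if_neg hc]
          by_cases h1 : PySem.Str.lower y ∈ pvStop
          · simp [h1]
          · have h2 : PySem.Str.lower x ≠ PySem.Str.lower y := fun he => hc ⟨h1, he⟩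
            simp [h1, h2]
      rw [pvFoldlIdem w2 _ _ pvApplyPair (fun q => q.1 ≠ [] ∧ q.2 ≠ []) hf2 pvPairI pvPairIdem p hp]
      simp [hs]
  rw [pvFoldlIdem w1 _ _ pvApplyPair (fun q => q.1 ≠ [] ∧ q.2 ≠ []) hf pvPairI pvPairIdem (a, b) ⟨ha, hb⟩]
  rw [pvApplyPair_eq (a, b) ha]

theorem pvAnyKeys (nps : List (List String)) (i j : Nat) :
    (pvWds nps i).any (fun x => !(decide (PySem.Str.lower x ∈ pvStop)) && (pvWds nps j).any (fun y =>
        !(decide (PySem.Str.lower y ∈ pvStop)) && (PySem.Str.lower x == PySem.Str.lower y)))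
    = (pvKeys nps i).any (fun x => decide (x ∈ pvKeys nps j)) := by
  rw [Bool.eq_iff_iff]
  simp only [List.any_eq_true, Bool.and_eq_true, Bool.not_eq_eq_eq_not, Bool.not_true,
    decide_eq_false_iff_not, decide_eq_true_eq, beq_iff_eq, pvMem_keys, List.mem_map]
  constructor
  · rintro ⟨x, hx, hxs, y, hy, hys, hxy⟩
    exact ⟨PySem.Str.lower x, ⟨⟨x, hx, rfl⟩, hxs⟩, ⟨⟨y, hy, hxy.symm⟩, hxs⟩⟩
  · rintro ⟨a, ⟨⟨x, hx, rfl⟩, hxs⟩, ⟨⟨y, hy, hya⟩, -⟩⟩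
    exact ⟨x, hx, hxs, y, hy, by rw [hya]; exact hxs, hya.symm⟩

theorem pvPartnersOf_append (k : Nat) (P Q : List (Nat × Nat)) :
    pvPartnersOf k (P ++ Q) = pvPartnersOf k P ++ pvPartnersOf k Q := by
  unfold pvPartnersOf
  exact List.filterMap_append


theorem pvSingle (i j k : Nat) :
    pvPartnersOf k [(i, j)] = if i = k then [j] else if j = k then [i] else [] := by
  unfold pvPartnersOf
  simp only [List.filterMap_cons, List.filterMap_nil]
  by_cases h1 : i = k
  · simp [h1]
  · rw [if_neg h1, if_neg h1]
    by_cases h2 : j = k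
    · simp [h2]
    · simp [h2]

theorem pvExt_other (nps : List (List String)) (P : List (Nat × Nat)) (i j k : Nat)
    (h1 : i ≠ k) (h2 : j ≠ k) : pvExt nps k (P ++ [(i, j)]) = pvExt nps k P := by
  unfold pvExt
  split
  · rw [pvPartnersOf_append, List.find?_append, pvSingle, if_neg h1, if_neg h2]
    simp
  · rfl

theorem pvStep (nps : List (List String)) (H : ∀ np ∈ nps, 2 ≤ np.length)
    (P : List (Nat × Nat)) (i j : Nat) (hij : i < j) (hjn : j < nps.length) :
    pvStepPair ((List.range nps.length).map (fun k => pvOrig nps k ++ pvExt nps k P)) i j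
      = (List.range nps.length).map (fun k => pvOrig nps k ++ pvExt nps k (P ++ [(i, j)])) := by
  have hin : i < nps.length := by omega
  have horig : ∀ k, k < nps.length → 2 ≤ (pvOrig nps k).length :=
    fun k hk => H _ (pvOrig_mem nps k hk)
  have hne : ∀ k, k < nps.length → pvOrig nps k ≠ [] := by
    intro k hk
    have := horig k hk
    intro h
    rw [h] at this
    simp at this
  have hane : ∀ k, k < nps.length → pvOrig nps k ++ pvExt nps k P ≠ [] := by
    intro k hk h
    rw [List.append_eq_nil_iff] at h
    exact hne k hk h.1
  unfold pvStepPair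
  simp only []
  rw [pvMapRangeGetD _ _ _ _ hin, pvMapRangeGetD _ _ _ _ hjn]
  rw [PySem.List.pyGetD_ofNat', PySem.List.pyGetD_ofNat']
  rw [pvAppendGetD (pvOrig nps i) _ 1 (by have := horig i hin; omega)]
  rw [pvAppendGetD (pvOrig nps j) _ 1 (by have := horig j hjn; omega)]
  have hw1 : PySem.Str.split₀ ((pvOrig nps i).getD 1 "") = pvWds nps i := by
    unfold pvWds
    rw [PySem.List.pyGetD_ofNat']
  have hw2 : PySem.Str.split₀ ((pvOrig nps j).getD 1 "") = pvWds nps j := by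
    unfold pvWds
    rw [PySem.List.pyGetD_ofNat']
  rw [hw1, hw2]
  by_cases hlc : (pvWds nps i).length > 1 ∨ (pvWds nps j).length > 1
  · rw [if_pos hlc]
    rw [pvWordFold _ _ _ _ (hane i hin) (hane j hjn)]
    rw [pvAnyKeys nps i j]
    have hd1 : (pvOrig nps i ++ pvExt nps i P).getD 0 "" = pvHd nps i := by
      rw [pvAppendGetD _ _ 0 (by have := horig i hin; omega)]
      unfold pvHd
      rw [PySem.List.pyGetD_ofNat']
    have hd2 : (pvOrig nps j ++ pvExt nps j P).getD 0 "" = pvHd nps j := by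
      rw [pvAppendGetD _ _ 0 (by have := horig j hjn; omega)]
      unfold pvHd
      rw [PySem.List.pyGetD_ofNat']
    rw [hd1, hd2]
    have hMij : pvM nps i j = (pvKeys nps i).any (fun x => decide (x ∈ pvKeys nps j)) := by
      unfold pvM
      rw [Bool.and_eq_right_iff_imp.2]
      intro _
      rcases hlc with h | h
      · simp [h]
      · simp [h]
    have hMji : pvM nps j i = (pvKeys nps i).any (fun x => decide (x ∈ pvKeys nps j)) := by
      rw [pvM_symm, hMij]
    by_cases hA : ((pvKeys nps i).any (fun x => decide (x ∈ pvKeys nps j))) = true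
    · rw [if_pos hA]
      simp only []
      apply List.ext_getElem (by simp)
      intro k hk1 hk2
      have hkn : k < nps.length := by simpa using hk1
      rw [List.getElem_set, List.getElem_set, List.getElem_map, List.getElem_map,
        List.getElem_range]
      by_cases hjk : j = k
      · subst hjk
        rw [if_pos rfl]
        by_cases hl : (pvOrig nps j).length = 2
        · cases hfp : (pvPartnersOf j P).find? (fun m => pvM nps j m) with
          | some m =>
            have e1 : pvExt nps j P = [pvHd nps m] := by
              unfold pvExt
              rw [if_pos hl, hfp]
            have e2 : pvExt nps j (P ++ [(i, j)]) = [pvHd nps m] := by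
              unfold pvExt
              rw [if_pos hl, pvPartnersOf_append, List.find?_append, hfp]
              rfl
            rw [e1, e2]
            unfold pvA2
            rw [if_neg (by simp [hl])]
          | none =>
            have e1 : pvExt nps j P = [] := by
              unfold pvExt
              rw [if_pos hl, hfp]
            have e2 : pvExt nps j (P ++ [(i, j)]) = [pvHd nps i] := by
              unfold pvExt
              rw [if_pos hl, pvPartnersOf_append, List.find?_append, hfp, pvSingle,
                if_neg (by omega), if_pos rfl]
              simp only [Option.none_or, List.find?_cons, hMji, hA]
            rw [e1, e2]
            unfold pvA2
            rw [if_pos (by simp [hl])]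
            simp
        · have e1 : pvExt nps j P = [] := by
            unfold pvExt
            rw [if_neg hl]
          have e2 : pvExt nps j (P ++ [(i, j)]) = [] := by
            unfold pvExt
            rw [if_neg hl]
          rw [e1, e2]
          unfold pvA2
          rw [if_neg (by simp; omega)]
      · rw [if_neg hjk]
        by_cases hik : i = k
        · subst hik
          rw [if_pos rfl]
          by_cases hl : (pvOrig nps i).length = 2
          · cases hfp : (pvPartnersOf i P).find? (fun m => pvM nps i m) with
            | some m =>
              have e1 : pvExt nps i P = [pvHd nps m] := by
                unfold pvExt
                rw [if_pos hl, hfp]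
              have e2 : pvExt nps i (P ++ [(i, j)]) = [pvHd nps m] := by
                unfold pvExt
                rw [if_pos hl, pvPartnersOf_append, List.find?_append, hfp]
                rfl
              rw [e1, e2]
              unfold pvA2
              rw [if_neg (by simp [hl])]
            | none =>
              have e1 : pvExt nps i P = [] := by
                unfold pvExt
                rw [if_pos hl, hfp]
              have e2 : pvExt nps i (P ++ [(i, j)]) = [pvHd nps j] := by
                unfold pvExt
                rw [if_pos hl, pvPartnersOf_append, List.find?_append, hfp, pvSingle,
                  if_pos rfl]
                simp only [Option.none_or, List.find?_cons, hMij, hA]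
              rw [e1, e2]
              unfold pvA2
              rw [if_pos (by simp [hl])]
              simp
          · have e1 : pvExt nps i P = [] := by
              unfold pvExt
              rw [if_neg hl]
            have e2 : pvExt nps i (P ++ [(i, j)]) = [] := by
              unfold pvExt
              rw [if_neg hl]
            rw [e1, e2]
            unfold pvA2
            rw [if_neg (by simp; omega)]
        · rw [if_neg hik, pvExt_other nps P i j k hik hjk]
    · rw [if_neg hA]
      have hext : ∀ k, pvExt nps k (P ++ [(i, j)]) = pvExt nps k P := by
        intro k
        by_cases hik : i = k
        · subst hik
          unfold pvExt
          split
          · rw [pvPartnersOf_append, List.find?_append, pvSingle, if_pos rfl]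
            have : List.find? (fun m => pvM nps i m) [j] = none := by
              simp only [List.find?_cons, hMij]
              simp only [Bool.not_eq_true] at hA
              rw [hA]
              rfl
            rw [this]
            simp
          · rfl
        · by_cases hjk : j = k
          · subst hjk
            unfold pvExt
            split
            · rw [pvPartnersOf_append, List.find?_append, pvSingle, if_neg hik, if_pos rfl]
              have : List.find? (fun m => pvM nps j m) [i] = none := by
                simp only [List.find?_cons, hMji]
                simp only [Bool.not_eq_true] at hA
                rw [hA]
                rfl
              rw [this]
              simp
            · rfl
          · exact pvExt_other nps P i j k hik hjk
      apply List.ext_getElem (by simp)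
      intro k hk1 hk2
      rw [List.getElem_set, List.getElem_set, List.getElem_map, List.getElem_map,
        List.getElem_range, hext]
      simp only []
      by_cases hjk : j = k
      · subst hjk
        rw [if_pos rfl]
      · rw [if_neg hjk]
        by_cases hik : i = k
        · subst hik
          rw [if_pos rfl]
        · rw [if_neg hik]
  · rw [if_neg hlc]
    have h1 : ¬ (pvWds nps i).length > 1 := fun h => hlc (Or.inl h)
    have h2 : ¬ (pvWds nps j).length > 1 := fun h => hlc (Or.inr h)
    have hMij : pvM nps i j = false := by
      unfold pvM
      simp [h1, h2]
    have hMji : pvM nps j i = false := by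
      rw [pvM_symm]
      exact hMij
    have hext : ∀ k, pvExt nps k (P ++ [(i, j)]) = pvExt nps k P := by
      intro k
      by_cases hik : i = k
      · subst hik
        unfold pvExt
        split
        · rw [pvPartnersOf_append, List.find?_append, pvSingle, if_pos rfl]
          have : List.find? (fun m => pvM nps i m) [j] = none := by
            simp only [List.find?_cons, hMij]
            rfl
          rw [this]
          simp
        · rfl
      · by_cases hjk : j = k
        · subst hjk
          unfold pvExt
          split
          · rw [pvPartnersOf_append, List.find?_append, pvSingle, if_neg hik, if_pos rfl]
            have : List.find? (fun m => pvM nps j m) [i] = none := by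
              simp only [List.find?_cons, hMji]
              rfl
            rw [this]
            simp
          · rfl
        · exact pvExt_other nps P i j k hik hjk
    apply List.map_congr_left
    intro k _
    rw [hext]

theorem pvA_inv (nps : List (List String)) (H : ∀ np ∈ nps, 2 ≤ np.length)
    (P : List (Nat × Nat)) (hP : ∀ p ∈ P, p.1 < p.2 ∧ p.2 < nps.length) :
    P.foldl (fun s p => pvStepPair s p.1 p.2) nps
      = (List.range nps.length).map (fun k => pvOrig nps k ++ pvExt nps k P) := by
  induction P using List.reverseRecOn with
  | nil =>
    simp only [List.foldl_nil]
    have hc : ∀ k ∈ List.range nps.length, pvOrig nps k ++ pvExt nps k [] = pvOrig nps k := by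
      intro k _
      have he : pvExt nps k [] = [] := by
        unfold pvExt pvPartnersOf
        split <;> simp
      rw [he, List.append_nil]
    rw [List.map_congr_left hc, pvMapOrig]
  | append_singleton P p ih =>
    rw [List.foldl_append, ih (fun q hq => hP q (by simp [hq])), List.foldl_cons, List.foldl_nil]
    exact pvStep nps H P p.1 p.2 (hP p (by simp)).1 (hP p (by simp)).2

theorem pvRangeSplit (s a b : Nat) : List.range' s (a+b) = List.range' s a ++ List.range' (s+a) b := by
  have := @List.range'_append s a b 1
  simpa using this.symm

theorem pvPartners_combos (n k : Nat) (hk : k < n) :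
    pvPartnersOf k (pvCombos n) = (List.range n).filter (fun m => m ≠ k) := by
  unfold pvPartnersOf pvCombos
  rw [List.filterMap_flatMap]
  have hsplit : List.range n = (List.range k ++ [k]) ++ List.range' (k+1) (n-(k+1)) := by
    rw [← List.range_succ, List.range_eq_range', List.range_eq_range']
    rw [show n = (k+1) + (n-(k+1)) by omega, pvRangeSplit]
    simp
  rw [hsplit]
  rw [List.flatMap_append, List.flatMap_append, List.filter_append, List.filter_append]
  have hA1 : (List.range k).flatMap (fun i => List.filterMap
        (fun p => if p.1 = k then some p.2 else if p.2 = k then some p.1 else none)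
        ((List.range' (i + 1) (n - (i + 1))).map (fun j => (i, j)))) = List.range k := by
    have key : ∀ i ∈ List.range k, (List.filterMap
        (fun p => if p.1 = k then some p.2 else if p.2 = k then some p.1 else none)
        ((List.range' (i + 1) (n - (i + 1))).map (fun j => (i, j)))) = [i] := by
      intro i hi
      simp only [List.mem_range] at hi
      rw [List.filterMap_map]
      have hcong : ∀ j, ((fun p => if p.1 = k then some p.2 else if p.2 = k then some p.1 else none) ∘ (fun j => (i, j))) j
          = (fun j => if j = k then some i else none) j := by
        intro j; simp only [Function.comp]; simp only [if_neg (by omega : ¬ i = k)]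
      rw [List.filterMap_congr (fun x _ => hcong x)]
      have hsp : List.range' (i+1) (n-(i+1)) = List.range' (i+1) (k-(i+1)) ++ List.range' k (n-k) := by
        rw [show n-(i+1) = (k-(i+1)) + (n-k) by omega, pvRangeSplit]
        congr 2
        omega
      rw [hsp, List.filterMap_append]
      have h1 : List.filterMap (fun j => if j = k then some i else none) (List.range' (i+1) (k-(i+1))) = [] := by
        rw [List.filterMap_eq_nil_iff]
        intro a ha; simp only [List.mem_range'_1] at ha
        simp [if_neg (by omega : ¬ a = k)]
      have h2 : List.range' k (n-k) = k :: List.range' (k+1) (n-(k+1)) := by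
        rw [show n-k = (n-(k+1))+1 by omega, List.range'_succ]
      rw [h1, h2]
      simp only [List.nil_append, List.filterMap_cons]
      have h3 : List.filterMap (fun j => if j = k then some i else none) (List.range' (k+1) (n-(k+1))) = [] := by
        rw [List.filterMap_eq_nil_iff]
        intro a ha; simp only [List.mem_range'_1] at ha
        simp [if_neg (by omega : ¬ a = k)]
      simp [h3]
    calc (List.range k).flatMap _ = (List.range k).flatMap (fun i => [i]) := List.flatMap_congr key
      _ = List.range k := List.flatMap_singleton' _
  have hA2 : ([k] : List Nat).flatMap (fun i => List.filterMap
        (fun p => if p.1 = k then some p.2 else if p.2 = k then some p.1 else none)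
        ((List.range' (i + 1) (n - (i + 1))).map (fun j => (i, j)))) = List.range' (k+1) (n-(k+1)) := by
    simp only [List.flatMap_cons, List.flatMap_nil, List.append_nil]
    rw [List.filterMap_map]
    have hcong : ∀ j, ((fun p => if p.1 = k then some p.2 else if p.2 = k then some p.1 else none) ∘ (fun j => (k, j))) j = some j := by
      intro j; simp [Function.comp]
    rw [List.filterMap_congr (fun x _ => hcong x)]
    simp
  have hA3 : (List.range' (k+1) (n-(k+1))).flatMap (fun i => List.filterMap
        (fun p => if p.1 = k then some p.2 else if p.2 = k then some p.1 else none)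
        ((List.range' (i + 1) (n - (i + 1))).map (fun j => (i, j)))) = [] := by
    rw [List.flatMap_eq_nil_iff]
    intro i hi
    simp only [List.mem_range'_1] at hi
    rw [List.filterMap_map, List.filterMap_eq_nil_iff]
    intro j hj
    simp only [List.mem_range'_1] at hj
    simp only [Function.comp]
    simp [if_neg (by omega : ¬ i = k), if_neg (by omega : ¬ j = k)]
  have hB1 : (List.range k).filter (fun m => m ≠ k) = List.range k :=
    List.filter_eq_self.2 (by intro a ha; simp only [List.mem_range] at ha; simp; omega)
  have hB2 : ([k] : List Nat).filter (fun m => m ≠ k) = [] := by simp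
  have hB3 : (List.range' (k+1) (n-(k+1))).filter (fun m => m ≠ k) = List.range' (k+1) (n-(k+1)) :=
    List.filter_eq_self.2 (by intro a ha; simp only [List.mem_range'_1] at ha; simp; omega)
  rw [hA1, hA2, hA3, hB1, hB2, hB3]
  simp


theorem pvB_inv (nps : List (List String)) (H : ∀ np ∈ nps, 2 ≤ np.length) (j : Nat)
    (hj : j ≤ nps.length) :
    (List.range j).foldl (fun s k =>
      let np := s.getD k []
      if np.length == 2 then
        match ((List.range nps.length).filter (fun m => m ≠ k)).find?
            (fun m => pvMatch (nps.map pvInfo) k m) with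
        | some m => s.set k (np ++ [PySem.List.pyGetD (s.getD m []) 0 ""])
        | none => s
      else s) nps
      = (List.range nps.length).map (fun m => if m < j then pvFin nps m else pvOrig nps m) := by
  induction j with
  | zero =>
    simp only [List.range_zero, List.foldl_nil]
    have hc : ∀ m ∈ List.range nps.length,
        (if m < 0 then pvFin nps m else pvOrig nps m) = pvOrig nps m := by
      intro m _; rw [if_neg (by omega)]
    rw [List.map_congr_left hc, pvMapOrig]
  | succ j ih =>
    have hj' : j < nps.length := by omega
    rw [List.range_succ, List.foldl_append, ih (by omega), List.foldl_cons, List.foldl_nil]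
    simp only []
    have hgetj : ((List.range nps.length).map
        (fun m => if m < j then pvFin nps m else pvOrig nps m)).getD j [] = pvOrig nps j := by
      rw [pvMapRangeGetD _ _ _ _ hj']
      simp
    rw [hgetj]
    have hfcong : ((List.range nps.length).filter (fun m => m ≠ j)).find?
          (fun m => pvMatch (nps.map pvInfo) j m)
        = ((List.range nps.length).filter (fun m => m ≠ j)).find? (fun m => pvM nps j m) := by
      apply pvFind?_congr
      intro x hx
      simp only [List.mem_filter, List.mem_range] at hx
      exact pvMatch_eq nps j x hj' hx.1
    by_cases hlen : (pvOrig nps j).length = 2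
    · rw [if_pos (by simpa using hlen)]
      rw [hfcong]
      split
      case h_2 hf =>
        apply List.map_congr_left
        intro m hm
        simp only [List.mem_range] at hm
        by_cases hmj : m = j
        · subst hmj
          rw [if_neg (by omega), if_pos (by omega)]
          unfold pvFin
          rw [if_pos hlen, hf]
        · by_cases h1 : m < j
          · rw [if_pos h1, if_pos (by omega)]
          · rw [if_neg h1, if_neg (by omega)]
      case h_1 m hf =>
        have hmprop : m ∈ (List.range nps.length).filter (fun m => m ≠ j) :=
          List.mem_of_find?_eq_some hf
        simp only [List.mem_filter, List.mem_range, decide_eq_true_eq] at hmprop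
        have hhd : (((List.range nps.length).map
            (fun m => if m < j then pvFin nps m else pvOrig nps m)).getD m []).getD 0 ""
            = pvHd nps m := by
          rw [pvMapRangeGetD _ _ _ _ hmprop.1]
          have hne : 2 ≤ (pvOrig nps m).length := H _ (pvOrig_mem nps m hmprop.1)
          by_cases h1 : m < j
          · rw [if_pos h1]
            unfold pvFin pvHd
            rw [PySem.List.pyGetD_ofNat']
            split
            · split
              · rw [pvAppendGetD _ _ 0 (by omega)]
              · rfl
            · rfl
          · rw [if_neg h1]
            unfold pvHd
            rw [PySem.List.pyGetD_ofNat']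
        rw [PySem.List.pyGetD_ofNat', hhd]
        rw [pvSetMapRange _ _ _ _ hj']
        apply List.map_congr_left
        intro m' hm'
        simp only [List.mem_range] at hm'
        by_cases hmj : m' = j
        · subst hmj
          rw [if_pos rfl, if_pos (by omega)]
          unfold pvFin
          rw [if_pos hlen, hf]
        · rw [if_neg hmj]
          by_cases h1 : m' < j
          · rw [if_pos h1, if_pos (by omega)]
          · rw [if_neg h1, if_neg (by omega)]
    · rw [if_neg (by simpa using hlen)]
      apply List.map_congr_left
      intro m hm
      simp only [List.mem_range] at hm
      by_cases hmj : m = j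
      · subst hmj
        rw [if_neg (by omega), if_pos (by omega)]
        unfold pvFin
        rw [if_neg hlen]
      · by_cases h1 : m < j
        · rw [if_pos h1, if_pos (by omega)]
        · rw [if_neg h1, if_neg (by omega)]

-- ===== VERDICT (by name: the statement is the Claim_ definition above) =====
theorem pvFinal (nps : List (List String)) (k : Nat) (hk : k < nps.length) :
    pvOrig nps k ++ pvExt nps k (pvCombos nps.length) = pvFin nps k := by
  unfold pvExt pvFin
  rw [pvPartners_combos _ _ hk]
  by_cases hl : (pvOrig nps k).length = 2
  · rw [if_pos hl, if_pos hl]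
    cases ((List.range nps.length).filter (fun m => m ≠ k)).find? (fun m => pvM nps k m) with
    | some m => rfl
    | none => simp
  · rw [if_neg hl, if_neg hl, List.append_nil]

theorem strict_head_matching_spec : Claim_equal_strict_head_matching := by
  unfold Claim_equal_strict_head_matching Spec_strict_head_matching
  intro nps _ hpre
  unfold strict_head_matching strict_head_matching_alt
  simp only []
  by_cases hn : nps.length < 2
  · rw [if_pos hn]
    have hc : pvCombos nps.length = [] := by
      have h01 : nps.length = 0 ∨ nps.length = 1 := by omega
      rcases h01 with h | h <;> rw [h] <;> rfl
    rw [hc, List.foldl_nil]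
  · rw [if_neg hn]
    have H : ∀ np ∈ nps, 2 ≤ np.length := by
      rcases hpre with h | h
      · exact absurd h hn
      · exact h
    have hcomb : ∀ p ∈ pvCombos nps.length, p.1 < p.2 ∧ p.2 < nps.length := by
      intro p hp
      unfold pvCombos at hp
      simp only [List.mem_flatMap, List.mem_map, List.mem_range, List.mem_range'_1] at hp
      obtain ⟨i, hi, j, hj, rfl⟩ := hp
      constructor <;> omega
    rw [pvA_inv nps H (pvCombos nps.length) hcomb]
    rw [pvB_inv nps H nps.length le_rfl]
    apply List.map_congr_left
    intro k hk
    simp only [List.mem_range] at hk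
    rw [if_pos hk]
    exact pvFinal nps k hk
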